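-- pv_equiv track=rewrite | github.com/cassandrakane/Lyricized | lyrics.py | clean_lyrics
-- ===== SOURCE A (Python) =====
-- def clean_lyrics(lyrics):
--     chars = []
--     brackets = False
--     length = len(lyrics)
--     for i in range(length):
--         character = lyrics[i]
--         if character in "([":       # Remove all content within parenthesis and square brackets
--             brackets = True
--         # Ensure RNN can process character, and eliminate double line breaks
--         if not brackets and ord(lyrics[i]) < 128 and not (i != length - 1 and lyrics[i] == "\n" and lyrics[i + 1] == "\n"):
--             chars.append(character)
--         if character in ")]":
--             brackets = False
--
--     cleaned = "".join(chars)        # Concatenate characters into one string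
--     return cleaned
-- ===== SOURCE B (Python) =====
-- def clean_lyrics(lyrics):
--     # collapse doubled newlines (original adjacency: drop a '\n' followed by '\n')
--     collapsed = ''.join(a for a, b in zip(lyrics, lyrics[1:]) if a != '\n' or b != '\n') + lyrics[-1:]
--     # keep only ASCII characters
--     s = ''.join(c for c in collapsed if ord(c) < 128)
--     # drop bracketed spans: from an opener to the first closer (or end of string)
--     chunks = []
--     it = iter(s)
--     for c in it:
--         if c in '([':
--             for d in it:
--                 if d in ')]':
--                     break
--         else:
--             chunks.append(c)
--     return ''.join(chunks)
-- ===== Notes on version B (the rewrite author's own statement) =====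
-- stated objective: idiomatic
-- what changed: Replaced the single indexed loop with a boolean in-brackets flag by a three-stage pipeline: a pairwise zip comprehension that collapses doubled newlines, an ASCII filter, and an iterator pass whose nested inner loop consumes each bracketed span up to its first closer.
import Mathlib
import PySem

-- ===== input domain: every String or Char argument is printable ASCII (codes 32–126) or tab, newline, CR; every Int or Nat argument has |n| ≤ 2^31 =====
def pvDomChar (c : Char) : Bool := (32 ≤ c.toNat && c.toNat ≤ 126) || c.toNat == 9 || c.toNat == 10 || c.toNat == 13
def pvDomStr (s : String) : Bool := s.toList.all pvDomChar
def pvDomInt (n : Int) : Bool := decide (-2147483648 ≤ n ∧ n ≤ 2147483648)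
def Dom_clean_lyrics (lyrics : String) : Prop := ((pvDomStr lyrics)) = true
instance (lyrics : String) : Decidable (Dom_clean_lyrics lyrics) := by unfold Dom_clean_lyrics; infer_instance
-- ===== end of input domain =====

-- B replaces A's indexed loop with a flag by an idiomatic pipeline (collapse doubled
-- newlines via pairwise zip, ASCII filter, iterator pass skipping bracketed spans);
-- same result, proved equal on all inputs.

-- ===== PORT A =====
-- literal transliteration of A's 'for i in range(length)' loop over (chars, brackets)
def clean_lyrics (lyrics : String) : String :=
  let l := lyrics.toList
  let length : Int := l.length
  let step : (List Char × Bool) → Int → (List Char × Bool) := fun st i =>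
    match PySem.List.pyGet? l i with
    | none => st  -- unreachable: i ranges over [0, length)
    | some character =>
      let brackets := if character = '(' ∨ character = '[' then true else st.2
      let chars :=
        if ¬brackets ∧ character.toNat < 128 ∧
            ¬(i ≠ length - 1 ∧ character = '\n' ∧ PySem.List.pyGet? l (i + 1) = some '\n')
        then st.1 ++ [character] else st.1
      let brackets := if character = ')' ∨ character = ']' then false else brackets
      (chars, brackets)
  let res := (PySem.List.pyRange 0 length 1).foldl step ([], false)
  String.mk res.1

-- ===== PORT B =====
-- inner 'for d in it: if d in ")]": break' — consume through the first closer
def pvSkipSpan : List Char → List Char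
  | [] => []
  | d :: r => if d = ')' ∨ d = ']' then r else pvSkipSpan r

theorem pvSkipSpan_length_le (l : List Char) : (pvSkipSpan l).length ≤ l.length := by
  induction l with
  | nil => simp [pvSkipSpan]
  | cons d r ih =>
    simp only [pvSkipSpan]
    split
    · simp
    · exact Nat.le_succ_of_le ih

-- outer 'for c in it' over the shared iterator
def pvDropSpans : List Char → List Char
  | [] => []
  | c :: r =>
    if c = '(' ∨ c = '[' then pvDropSpans (pvSkipSpan r)
    else c :: pvDropSpans r
termination_by l => l.length
decreasing_by
· exact Nat.lt_succ_of_le (pvSkipSpan_length_le r)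
· simp

def clean_lyrics_alt (lyrics : String) : String :=
  let l := lyrics.toList
  let collapsed :=
    ((l.zip (l.drop 1)).filter (fun p => p.1 ≠ '\n' ∨ p.2 ≠ '\n')).map (·.1)
      ++ PySem.List.slice l (some (-1)) none
  let s := collapsed.filter (fun c => c.toNat < 128)
  String.mk (pvDropSpans s)

-- ===== PRECONDITION & SPEC =====
def Spec_clean_lyrics (lyrics : String) (out : String) : Prop := out = clean_lyrics_alt lyrics
instance (lyrics : String) (out : String) : Decidable (Spec_clean_lyrics lyrics out) := by unfold Spec_clean_lyrics; infer_instance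

-- ===== CLAIM (what is proved, stated in full; the proofs are below) =====
def Claim_equal_clean_lyrics : Prop := ∀ (lyrics : String), Dom_clean_lyrics lyrics → Spec_clean_lyrics lyrics (clean_lyrics lyrics)

-- ===== LEMMAS AND PROOFS =====

-- A's loop as structural recursion on the remaining suffix: (emitted chars, final flag)
def pvALoop (b : Bool) : List Char → (List Char × Bool)
  | [] => ([], b)
  | c :: rest =>
    let b1 := if c = '(' ∨ c = '[' then true else b
    let keep := ¬b1 ∧ c.toNat < 128 ∧ ¬(c = '\n' ∧ rest.head? = some '\n')
    let b2 := if c = ')' ∨ c = ']' then false else b1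
    let p := pvALoop b2 rest
    ((if keep then c :: p.1 else p.1), p.2)

-- the newline-collapse filter with original adjacency, fused with the ASCII test
def pvF : List Char → List Char
  | [] => []
  | c :: rest =>
    (if c.toNat < 128 ∧ ¬(c = '\n' ∧ rest.head? = some '\n') then [c] else []) ++ pvF rest

-- the newline-collapse filter alone
def pvG : List Char → List Char
  | [] => []
  | c :: rest =>
    (if ¬(c = '\n' ∧ rest.head? = some '\n') then [c] else []) ++ pvG rest

theorem pvALoop_spec : ∀ (l : List Char) (b : Bool),
    (pvALoop b l).1 = if b then pvDropSpans (pvSkipSpan (pvF l)) else pvDropSpans (pvF l) := by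
  intro l
  induction l with
  | nil => intro b; cases b <;> simp [pvALoop, pvF, pvSkipSpan, pvDropSpans]
  | cons c rest ih =>
    intro b
    by_cases hop : c = '(' ∨ c = '['
    · have hk : c.toNat < 128 ∧ ¬(c = '\n' ∧ rest.head? = some '\n') := by
        rcases hop with h | h <;> subst h <;> simp
      have hnc : ¬(c = ')' ∨ c = ']') := by
        rcases hop with h | h <;> subst h <;> decide
      simp only [pvALoop, pvF, if_pos hop, if_pos hk, List.singleton_append]
      cases b <;>
        simp [pvDropSpans, pvSkipSpan, hop, hnc, ih true, hk]
    · by_cases hkeep : c.toNat < 128 ∧ ¬(c = '\n' ∧ rest.head? = some '\n')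
      · by_cases hcl : c = ')' ∨ c = ']'
        · simp only [pvALoop, pvF, if_neg hop, if_pos hkeep, List.singleton_append]
          cases b <;>
            simp [pvDropSpans, pvSkipSpan, hop, hcl, ih false, hkeep]
        · simp only [pvALoop, pvF, if_neg hop, if_pos hkeep, List.singleton_append]
          cases b <;>
            simp [pvDropSpans, pvSkipSpan, hop, hcl, ih true, ih false, hkeep]
      · have hnc : ¬(c = ')' ∨ c = ']') := by
          intro h
          apply hkeep
          rcases h with h | h <;> subst h <;> refine ⟨by decide, ?_⟩ <;> simp
        simp only [pvALoop, pvF, if_neg hop, if_neg hkeep, List.nil_append]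
        cases b <;>
          simp [hnc, ih true, ih false]; tauto

theorem pvCollapse_eq_G (l : List Char) :
    ((l.zip (l.drop 1)).filter (fun p => p.1 ≠ '\n' ∨ p.2 ≠ '\n')).map (·.1)
      ++ PySem.List.slice l (some (-1)) none = pvG l := by
  rw [PySem.List.slice_from_neg_one]
  induction l with
  | nil => simp [pvG]
  | cons c rest ih =>
    cases rest with
    | nil => simp [pvG]
    | cons d r =>
      have hG : pvG (c :: d :: r) = (if ¬(c = '\n' ∧ d = '\n') then [c] else []) ++ pvG (d :: r) := by
        simp [pvG]
      rw [hG, ← ih]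
      have hdrop : (c :: d :: r).drop ((c :: d :: r).length - 1) = (d :: r).drop ((d :: r).length - 1) := by
        simp [List.length_cons]
      simp only [List.drop_one, List.zip_cons_cons, List.tail_cons, List.filter_cons, hdrop]
      by_cases h : c = '\n' ∧ d = '\n'
      · simp [h]
      · have h' : c ≠ '\n' ∨ d ≠ '\n' := by tauto
        simp [h, h']

theorem pvFilter_G_eq_F (l : List Char) :
    (pvG l).filter (fun c => c.toNat < 128) = pvF l := by
  induction l with
  | nil => simp [pvG, pvF]
  | cons c rest ih =>
    simp only [pvG, pvF, List.filter_append, ih]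
    by_cases hd : c = '\n' ∧ rest.head? = some '\n'
    · simp [hd]
    · by_cases ha : c.toNat < 128 <;> simp [hd, ha]

theorem pvBridge (l : List Char) : ∀ (rest pre : List Char), l = pre ++ rest →
    ∀ (acc : List Char) (b : Bool),
    (PySem.List.pyRange (pre.length : Int) (l.length : Int) 1).foldl
      (fun st i =>
        match PySem.List.pyGet? l i with
        | none => st
        | some character =>
          let brackets := if character = '(' ∨ character = '[' then true else st.2
          let chars :=
            if ¬brackets ∧ character.toNat < 128 ∧
                ¬(i ≠ (l.length : Int) - 1 ∧ character = '\n' ∧ PySem.List.pyGet? l (i + 1) = some '\n')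
            then st.1 ++ [character] else st.1
          let brackets := if character = ')' ∨ character = ']' then false else brackets
          (chars, brackets))
      (acc, b)
    = (acc ++ (pvALoop b rest).1, (pvALoop b rest).2) := by
  intro rest
  induction rest with
  | nil =>
    intro pre hl acc b
    subst hl
    rw [PySem.List.pyRange_one_eq_nil (by simp)]
    simp [pvALoop]
  | cons c r ih =>
    intro pre hl acc b
    have hlen : (pre.length : Int) < (l.length : Int) := by
      subst hl; simp
    rw [PySem.List.pyRange_one_cons hlen, List.foldl_cons]
    have hget : PySem.List.pyGet? l (pre.length : Int) = some c := by
      rw [hl]; exact PySem.List.pyGet?_append_length pre r c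
    have hget1 : PySem.List.pyGet? l ((pre.length : Int) + 1) = r.head? := by
      rw [hl]
      have h := PySem.List.pyGet?_append_right pre (c :: r) 1
      simpa [List.head?_eq_getElem?] using h
    have hcond : ((pre.length : Int) ≠ (l.length : Int) - 1 ∧ c = '\n' ∧
        PySem.List.pyGet? l ((pre.length : Int) + 1) = some '\n')
        ↔ (c = '\n' ∧ r.head? = some '\n') := by
      rw [hget1]
      cases r with
      | nil => subst hl; simp
      | cons d t =>
        subst hl
        simp only [List.head?_cons]
        constructor
        · rintro ⟨_, h2, h3⟩; exact ⟨h2, h3⟩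
        · rintro ⟨h2, h3⟩
          refine ⟨?_, h2, h3⟩
          simp only [List.length_append, List.length_cons]
          omega
    have hcast : (pre.length : Int) + 1 = ((pre ++ [c]).length : Int) := by simp
    have hl' : l = (pre ++ [c]) ++ r := by simp [hl]
    simp only [hget, hcond]
    rw [hcast, ih (pre ++ [c]) hl']
    simp only [pvALoop]
    clear hget hget1 hcond hcast hl' hl hlen ih
    split_ifs <;> simp [List.append_assoc]

-- ===== VERDICT (by name: the statement is the Claim_ definition above) =====
theorem clean_lyrics_spec : Claim_equal_clean_lyrics := by
  intro lyrics _
  unfold Spec_clean_lyrics clean_lyrics clean_lyrics_alt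
  have hb := pvBridge lyrics.toList lyrics.toList [] rfl [] false
  simp only [List.nil_append, List.length_nil, Nat.cast_zero] at hb
  simp only [hb, pvCollapse_eq_G, pvFilter_G_eq_F, pvALoop_spec, Bool.false_eq_true, if_false]
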